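-- pv_equiv track=rewrite | github.com/LinOTP/LinOTP | linotp/lib/policy/evaluate.py | value_list_compare
-- ===== SOURCE A (Python) =====
-- WILDCARD_MATCH = "wildcard:match"
--
-- EXACT_MATCH = "exact:match"
--
-- NOT_MATCH = "not:match"
--
-- def value_list_compare(policy_conditions, action_name):
--     """
--     check if given action_name matches the conditions
--
--     :param policy_condition: the condition described in the policy
--     :param action_name: the name of the action, which could be a key=val
--     :return: booleans
--     """
--
--     conditions = [x.strip() for x in policy_conditions.split(",")]
--
--     if "*" in conditions:
--         return WILDCARD_MATCH, True
--
--     # exact action match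
--     if action_name in conditions:
--         return EXACT_MATCH, True
--
--     # extract action name from action_name=value
--     for condition in conditions:
--         cond_name, _sep, _cond_value = condition.partition("=")
--         if cond_name.strip() == action_name:
--             return EXACT_MATCH, True
--
--     return NOT_MATCH, False
-- ===== SOURCE B (Python) =====
-- WILDCARD_MATCH = "wildcard:match"
-- EXACT_MATCH = "exact:match"
-- NOT_MATCH = "not:match"
--
-- def value_list_compare(policy_conditions, action_name):
--     # one streaming pass over the characters: no split(), no condition list
--     saw_star = False
--     saw_exact = False
--     cur = ""
--     for ch in policy_conditions + ",":
--         if ch == ",":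
--             seg = cur.strip()
--             cur = ""
--             if seg == "*":
--                 saw_star = True
--             elif seg == action_name or seg.partition("=")[0].strip() == action_name:
--                 saw_exact = True
--         else:
--             cur += ch
--     if saw_star:
--         return WILDCARD_MATCH, True
--     if saw_exact:
--         return EXACT_MATCH, True
--     return NOT_MATCH, False
-- ===== Notes on version B (the rewrite author's own statement) =====
-- stated objective: alternative
-- what changed: B replaces A's split-into-a-list plus three staged scans (wildcard membership, exact membership, partition loop with early returns) by a single streaming character-level pass over policy_conditions that builds each segment in an accumulator and records two flags (saw_star, saw_exact), deciding the result once at the end.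
import Mathlib
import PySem

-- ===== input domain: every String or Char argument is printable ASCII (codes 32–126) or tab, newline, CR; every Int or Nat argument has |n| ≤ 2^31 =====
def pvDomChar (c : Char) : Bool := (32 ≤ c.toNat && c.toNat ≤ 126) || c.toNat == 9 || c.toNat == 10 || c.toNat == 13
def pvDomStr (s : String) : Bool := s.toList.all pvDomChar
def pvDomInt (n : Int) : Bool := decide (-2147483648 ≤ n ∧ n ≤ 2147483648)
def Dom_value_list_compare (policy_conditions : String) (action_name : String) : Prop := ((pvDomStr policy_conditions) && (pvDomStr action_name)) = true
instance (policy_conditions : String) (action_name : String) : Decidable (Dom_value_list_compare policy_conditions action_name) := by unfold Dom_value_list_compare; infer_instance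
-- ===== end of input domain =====

-- B replaces A's split-into-a-list plus three staged scans by a single streaming
-- character pass with an accumulator and two flags (objective: alternative).

-- s.partition("=")[0]: exact for the one-character separator "=" (prefix before the
-- first '=', the whole string when '=' is absent)
def pyPartitionFstChars (s : List Char) : List Char := s.takeWhile (fun c => c ≠ '=')

-- ===== PORT A =====
def vlcLoopA (conditions : List String) (action_name : String) : String × Bool :=
  match conditions with
  | [] => ("not:match", false)
  | condition :: rest =>
      if PySem.Chars.strip (pyPartitionFstChars condition.toList) = action_name.toList then
        ("exact:match", true)
      else vlcLoopA rest action_name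

def value_list_compare (policy_conditions : String) (action_name : String) : String × Bool :=
  let conditions : List String := ((PySem.Str.split? policy_conditions ",").getD []).map PySem.Str.strip
  if conditions.contains "*" then ("wildcard:match", true)
  else if conditions.contains action_name then ("exact:match", true)
  else vlcLoopA conditions action_name

-- ===== PORT B =====
-- one step of B's streaming loop: state = (current segment, saw_star, saw_exact)
def vlcStepB (action_name : String) (st : List Char × Bool × Bool) (c : Char) :
    List Char × Bool × Bool :=
  if c = ',' then
    let seg := PySem.Chars.strip st.1
    if seg = ['*'] then ([], true, st.2.2)
    else if seg = action_name.toList ∨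
            PySem.Chars.strip (pyPartitionFstChars seg) = action_name.toList then
      ([], st.2.1, true)
    else ([], st.2.1, st.2.2)
  else (st.1 ++ [c], st.2.1, st.2.2)

def value_list_compare_alt (policy_conditions : String) (action_name : String) : String × Bool :=
  let st := (policy_conditions.toList ++ [',']).foldl (vlcStepB action_name) ([], false, false)
  if st.2.1 then ("wildcard:match", true)
  else if st.2.2 then ("exact:match", true)
  else ("not:match", false)

-- ===== PRECONDITION & SPEC =====
def Spec_value_list_compare (policy_conditions : String) (action_name : String) (out : String × Bool) : Prop := out = value_list_compare_alt policy_conditions action_name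
instance (policy_conditions : String) (action_name : String) (out : String × Bool) : Decidable (Spec_value_list_compare policy_conditions action_name out) := by unfold Spec_value_list_compare; infer_instance

-- ===== CLAIM (what is proved, stated in full; the proofs are below) =====
def Claim_equal_value_list_compare : Prop := ∀ (policy_conditions : String) (action_name : String), Dom_value_list_compare policy_conditions action_name → Spec_value_list_compare policy_conditions action_name (value_list_compare policy_conditions action_name)

-- ===== LEMMAS AND PROOFS =====

-- raw comma-separated segments of a character list, recursively
def vlcSegs : List Char → List (List Char)
  | [] => [[]]
  | c :: t =>
      if c = ',' then [] :: vlcSegs t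
      else match vlcSegs t with
           | [] => [[c]]
           | s :: ss => (c :: s) :: ss

theorem vlcSegs_ne_nil (l : List Char) : vlcSegs l ≠ [] := by
  cases l with
  | nil => simp [vlcSegs]
  | cons c t =>
      simp only [vlcSegs]
      split
      · simp
      · split <;> simp

-- prepend a prefix onto the first segment
def vlcPre (p : List Char) : List (List Char) → List (List Char)
  | [] => [p]
  | s :: ss => (p ++ s) :: ss

theorem vlc_splitOn_go (fuel : Nat) :
    ∀ (l cur : List Char) (acc : List (List Char)), l.length ≤ fuel →
      PySem.Chars.splitOn.go [','] fuel l cur acc = acc.reverse ++ vlcPre cur.reverse (vlcSegs l) := by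
  induction fuel with
  | zero =>
      intro l cur acc h
      have : l = [] := List.length_eq_zero_iff.mp (Nat.le_zero.mp h)
      subst this
      simp [PySem.Chars.splitOn.go, vlcSegs, vlcPre]
  | succ n ih =>
      intro l cur acc h
      cases l with
      | nil => simp [PySem.Chars.splitOn.go, vlcSegs, vlcPre]
      | cons c rest =>
          simp only [PySem.Chars.splitOn.go]
          by_cases hc : c = ','
          · subst hc
            have hpre : [','].isPrefixOf (',' :: rest) = true := by simp [List.isPrefixOf]
            rw [if_pos hpre]
            simp only [List.length_cons, List.length_nil, Nat.zero_add, List.drop_succ_cons, List.drop_zero] at *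
            rw [ih rest [] (cur.reverse :: acc) (by omega)]
            rcases hs : vlcSegs rest with _ | ⟨s, ss⟩
            · exact absurd hs (vlcSegs_ne_nil rest)
            · simp [vlcSegs, vlcPre, hs]
          · have hpre : [','].isPrefixOf (c :: rest) = false := by
              simp only [List.isPrefixOf, Bool.and_eq_false_iff, beq_eq_false_iff_ne, ne_eq]
              exact Or.inl fun h => hc h.symm
            rw [if_neg (by simp [hpre])]
            simp only [List.length_cons] at h
            rw [ih rest (c :: cur) acc (by omega)]
            rcases hs : vlcSegs rest with _ | ⟨s, ss⟩
            · exact absurd hs (vlcSegs_ne_nil rest)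
            · simp [vlcSegs, vlcPre, hs, hc]

theorem vlc_splitOn (l : List Char) :
    PySem.Chars.splitOn l [','] = vlcSegs l := by
  have := vlc_splitOn_go (l.length + 1) l [] [] (by omega)
  rcases hs : vlcSegs l with _ | ⟨s, ss⟩
  · exact absurd hs (vlcSegs_ne_nil l)
  · simpa [PySem.Chars.splitOn, vlcPre, hs] using this

-- the per-segment flag update B performs at each comma
def vlcFlag (a : String) (st : Bool × Bool) (u : List Char) : Bool × Bool :=
  let seg := PySem.Chars.strip u
  if seg = ['*'] then (true, st.2)
  else if seg = a.toList ∨ PySem.Chars.strip (pyPartitionFstChars seg) = a.toList then (st.1, true)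
  else st

-- B's fold processes exactly the raw segments (with cur prepended to the first)
theorem vlc_fold_segs (a : String) :
    ∀ (l cur : List Char) (fl : Bool × Bool),
      (l ++ [',']).foldl (vlcStepB a) (cur, fl) =
        ([], (vlcPre cur (vlcSegs l)).foldl (vlcFlag a) fl) := by
  intro l
  induction l with
  | nil =>
      intro cur fl
      simp only [List.nil_append, List.foldl_cons, List.foldl_nil, vlcStepB,
        vlcSegs, vlcPre, List.foldl_cons, vlcFlag, List.append_nil]
      by_cases h1 : PySem.Chars.strip cur = ['*']
      · simp [h1]
      · by_cases h2 : PySem.Chars.strip cur = a.toList ∨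
            PySem.Chars.strip (pyPartitionFstChars (PySem.Chars.strip cur)) = a.toList
        · simp [h1, h2]
        · simp [h1, h2]
  | cons c t ih =>
      intro cur fl
      by_cases hc : c = ','
      · subst hc
        simp only [List.cons_append, List.foldl_cons]
        have hstep : vlcStepB a (cur, fl) ',' = ([], vlcFlag a fl cur) := by
          simp only [vlcStepB, vlcFlag]
          by_cases h1 : PySem.Chars.strip cur = ['*']
          · simp [h1]
          · by_cases h2 : PySem.Chars.strip cur = a.toList ∨
                PySem.Chars.strip (pyPartitionFstChars (PySem.Chars.strip cur)) = a.toList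
            · simp [h1, h2]
            · simp [h1, h2]
        rw [hstep, ih]
        rcases hs : vlcSegs t with _ | ⟨s, ss⟩
        · exact absurd hs (vlcSegs_ne_nil t)
        · simp [vlcSegs, vlcPre, hs]
      · simp only [List.cons_append, List.foldl_cons]
        have hstep : vlcStepB a (cur, fl) c = (cur ++ [c], fl) := by
          simp [vlcStepB, hc]
        rw [hstep, ih]
        rcases hs : vlcSegs t with _ | ⟨s, ss⟩
        · exact absurd hs (vlcSegs_ne_nil t)
        · simp [vlcSegs, vlcPre, hs, hc]

-- the match predicate shared by both programs, on a STRIPPED segment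
def vlcMatch (a : String) (seg : List Char) : Bool :=
  decide (seg = a.toList ∨ PySem.Chars.strip (pyPartitionFstChars seg) = a.toList)

-- the flag fold computes the two 'any' facts about the stripped segments
theorem vlc_flag_any (a : String) (L : List (List Char)) :
    ∀ fl : Bool × Bool,
      L.foldl (vlcFlag a) fl =
        (fl.1 || L.any (fun u => PySem.Chars.strip u = ['*']),
         fl.2 || L.any (fun u => PySem.Chars.strip u ≠ ['*'] && vlcMatch a (PySem.Chars.strip u))) := by
  induction L with
  | nil => intro fl; simp
  | cons u t ih =>
      intro fl
      simp only [List.foldl_cons, List.any_cons, ih]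
      by_cases hstar : PySem.Chars.strip u = ['*']
      · simp [vlcFlag, hstar]
      · by_cases hm : PySem.Chars.strip u = a.toList ∨
            PySem.Chars.strip (pyPartitionFstChars (PySem.Chars.strip u)) = a.toList
        · simp [vlcFlag, hstar, hm, vlcMatch]
        · simp [vlcFlag, hstar, hm, vlcMatch]

-- A's partition loop is the 'any' of the key predicate over the stripped conditions
theorem vlc_loopA_any (a : String) (L : List (List Char)) :
    vlcLoopA (L.map String.ofList) a =
      (if L.any (fun u => decide (PySem.Chars.strip (pyPartitionFstChars u) = a.toList))
       then ("exact:match", true) else ("not:match", false)) := by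
  induction L with
  | nil => simp [vlcLoopA]
  | cons u t ih =>
      simp only [List.map_cons, vlcLoopA, String.toList_ofList, List.any_cons]
      by_cases hk : PySem.Chars.strip (pyPartitionFstChars u) = a.toList
      · simp [hk]
      · simp [hk, ih]

theorem vlc_contains_map (L : List (List Char)) (x : List Char) :
    (L.map String.ofList).contains (String.ofList x) = L.any (fun u => u = x) := by
  induction L with
  | nil => simp
  | cons u t ih =>
      have hiff : String.ofList u = String.ofList x ↔ u = x :=
        ⟨fun hq => by simpa using congrArg String.toList hq, fun hq => by rw [hq]⟩
      simp only [List.map_cons, List.contains_cons, List.any_cons, ih]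
      by_cases h : u = x
      · simp [h]
      · have hb : (String.ofList x == String.ofList u) = false := by
          simp only [beq_eq_false_iff_ne, ne_eq]
          exact fun hq => h (by simpa using (congrArg String.toList hq).symm)
        simp [hb, h]

-- ===== VERDICT (by name: the statement is the Claim_ definition above) =====
theorem value_list_compare_spec : Claim_equal_value_list_compare := by
  intro pc a _
  show _ = _
  unfold value_list_compare value_list_compare_alt
  have hsplit : (PySem.Str.split? pc ",").getD [] = (vlcSegs pc.toList).map String.ofList := by
    have h1 : ("," : String).toList = [','] := rfl
    simp [PySem.Str.split?, PySem.Chars.split?, h1, vlc_splitOn]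
  rw [hsplit]
  set L : List (List Char) := vlcSegs pc.toList with hL
  set LS : List (List Char) := L.map PySem.Chars.strip with hLS
  have hfold := vlc_fold_segs a pc.toList [] (false, false)
  have hpre : vlcPre [] L = L := by
    rcases hs : L with _ | ⟨s, ss⟩
    · exact absurd (hL ▸ hs) (vlcSegs_ne_nil pc.toList)
    · simp [vlcPre]
  rw [hpre] at hfold
  rw [vlc_flag_any] at hfold
  -- rewrite both sides against the segment list L
  have hmap : (L.map String.ofList).map PySem.Str.strip = LS.map String.ofList := by
    rw [hLS]
    simp [PySem.Str.strip, Function.comp]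
  rw [hmap]
  have hstar : (LS.map String.ofList).contains "*" = L.any (fun u => PySem.Chars.strip u = ['*']) := by
    have : ("*" : String) = String.ofList ['*'] := rfl
    rw [this, vlc_contains_map, hLS]
    simp [List.any_map, Function.comp_def]
  have hexact : (LS.map String.ofList).contains a = L.any (fun u => decide (PySem.Chars.strip u = a.toList)) := by
    have : a = String.ofList a.toList := by
      apply String.ext  -- strings equal iff their lists equal
      simp
    rw [this, vlc_contains_map, hLS]
    simp [List.any_map, Function.comp_def]
  have hloop : vlcLoopA (LS.map String.ofList) a =
      (if L.any (fun u => decide (PySem.Chars.strip (pyPartitionFstChars (PySem.Chars.strip u)) = a.toList))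
       then ("exact:match", true) else ("not:match", false)) := by
    rw [vlc_loopA_any a LS, hLS]
    simp [List.any_map, Function.comp_def]
  simp only [hstar, hexact, hloop, hfold]
  by_cases hw : L.any (fun u => PySem.Chars.strip u = ['*']) = true
  · simp [hw]
  · simp only [hw, Bool.false_eq_true, if_false, Bool.false_or]
    have hw' : ∀ u ∈ L, ¬ PySem.Chars.strip u = ['*'] := by
      intro u hu h
      simp only [List.any_eq_true, not_exists] at hw
      exact hw u ⟨hu, by simp [h]⟩
    by_cases he : L.any (fun u => decide (PySem.Chars.strip u = a.toList)) = true
    · -- A returns exact via the membership scan; B's exact flag is also set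
      have hb : L.any (fun u => PySem.Chars.strip u ≠ ['*'] && vlcMatch a (PySem.Chars.strip u)) = true := by
        simp only [List.any_eq_true] at he ⊢
        obtain ⟨u, hu, hm⟩ := he
        refine ⟨u, hu, ?_⟩
        simp only [decide_eq_true_eq] at hm
        have hns := hw' u hu
        rw [hm] at hns
        simp [vlcMatch, hm, hns]
      simp only [hb, he]
      simp
    · -- no star, no whole-string match: B's exact flag is exactly the loop's key predicate
      have he' : ∀ u ∈ L, ¬ PySem.Chars.strip u = a.toList := by
        intro u hu h
        simp only [List.any_eq_true, not_exists] at he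
        exact he u ⟨hu, by simp [h]⟩
      have hcong : L.any (fun u => PySem.Chars.strip u ≠ ['*'] && vlcMatch a (PySem.Chars.strip u))
          = L.any (fun u => decide (PySem.Chars.strip (pyPartitionFstChars (PySem.Chars.strip u)) = a.toList)) := by
        rw [Bool.eq_iff_iff]
        simp only [List.any_eq_true]
        constructor
        · rintro ⟨u, hu, hp⟩
          refine ⟨u, hu, ?_⟩
          simp only [vlcMatch, Bool.and_eq_true, decide_eq_true_eq] at hp ⊢
          rcases hp with ⟨-, heq | hkey⟩
          · exact absurd heq (he' u hu)
          · exact hkey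
        · rintro ⟨u, hu, hp⟩
          simp only [decide_eq_true_eq] at hp
          simp only [vlcMatch, Bool.and_eq_true, decide_eq_true_eq]
          exact ⟨u, hu, hw' u hu, Or.inr hp⟩
      simp only [he, Bool.false_eq_true, if_false, hcong]
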